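-- pv_equiv track=rewrite | github.com/kkuntner/advent-of-code-2024 | 2/two.py | checkIfSave
-- ===== SOURCE A (Python) =====
-- def checkIfSave(level) -> bool:
--     dir = 0 # -1 for desc, 1 for inc
--
--     for i in range (1, len(level)): # omit the first item, start with the second since we only need the difference
--         diff = int(level[i]) - int(level[i-1])
--         if abs(diff) == 0 or abs(diff) > 3:
--             return False
--         if dir == 0: # if this is the first diff, set direction
--             if diff > 0:
--                 dir = 1
--             else:
--                 dir = -1
--         else:
--             if dir * diff < 0:
--                 return False
--     return True
-- ===== SOURCE B (Python) =====
-- def checkIfSave(level) -> bool: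
--     if all(1 <= int(b) - int(a) <= 3 for a, b in zip(level, level[1:])):
--         return True
--     return all(-3 <= int(b) - int(a) <= -1 for a, b in zip(level, level[1:]))
-- ===== Notes on version B (the rewrite author's own statement) =====
-- stated objective: simpler
-- what changed: Replaced the running-direction state machine with early returns by two uniform scans of the adjacent differences: all diffs in [1,3] or all diffs in [-3,-1].
import Mathlib
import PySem

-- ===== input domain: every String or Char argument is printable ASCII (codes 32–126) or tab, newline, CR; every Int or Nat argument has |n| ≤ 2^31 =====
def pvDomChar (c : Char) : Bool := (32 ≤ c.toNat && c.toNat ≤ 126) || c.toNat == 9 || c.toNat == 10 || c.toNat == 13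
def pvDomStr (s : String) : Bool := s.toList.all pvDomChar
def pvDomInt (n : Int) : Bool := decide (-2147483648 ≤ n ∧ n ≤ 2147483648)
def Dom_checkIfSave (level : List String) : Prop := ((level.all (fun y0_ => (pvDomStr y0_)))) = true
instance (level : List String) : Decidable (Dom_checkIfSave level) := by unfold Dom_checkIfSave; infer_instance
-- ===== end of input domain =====

-- B replaces A's running-direction state machine (early returns) by building the adjacent-difference
-- list once and checking that all diffs lie in [1,3] or all in [-3,-1] (objective: simpler).

-- ===== PORT A =====
-- int(level[j]) for an Int index j (in-range on every admitted call; junk values only outside Pre_)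
def pvIntAt (level : List String) (j : Int) : Int :=
  (PySem.Int.ofStr? ((PySem.List.pyGet? level j).getD "")).getD 0

-- the 'for i in range(1, len(level))' loop with its early returns and the running dir state
def checkIfSaveGo (level : List String) (dir : Int) (i : Nat) : Bool :=
  if h : i < level.length then
    let diff := pvIntAt level (i : Int) - pvIntAt level ((i : Int) - 1)
    if diff.natAbs = 0 ∨ diff.natAbs > 3 then false
    else if dir = 0 then checkIfSaveGo level (if diff > 0 then 1 else -1) (i + 1)
    else if dir * diff < 0 then false
    else checkIfSaveGo level dir (i + 1)
  else true
termination_by level.length - i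
decreasing_by all_goals omega

def checkIfSave (level : List String) : Bool := checkIfSaveGo level 0 1

-- ===== PORT B =====
-- int(s) with int()'s exact grammar; the default is never read on admitted inputs
def pvToInt (s : String) : Int := (PySem.Int.ofStr? s).getD 0

-- all(1 <= int(b) - int(a) <= 3 for a, b in zip(level, level[1:])) and the descending twin
def pvAllInc (level : List String) : Bool :=
  (level.zip level.tail).all (fun p =>
    decide (1 ≤ pvToInt p.2 - pvToInt p.1) && decide (pvToInt p.2 - pvToInt p.1 ≤ 3))

def pvAllDec (level : List String) : Bool :=
  (level.zip level.tail).all (fun p =>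
    decide (-3 ≤ pvToInt p.2 - pvToInt p.1) && decide (pvToInt p.2 - pvToInt p.1 ≤ -1))

def checkIfSave_alt (level : List String) : Bool :=
  if pvAllInc level then true else pvAllDec level

-- ===== PRECONDITION & SPEC =====
-- helpers for Pre_: the parsed values of the first j elements, their adjacent diffs, and the
-- 'safe monotone run' test (all diffs in [1,3] or all in [-3,-1])
def pvPrefNums (level : List String) (j : Nat) : List Int :=
  (level.take j).map (fun s => (PySem.Int.ofStr? s).getD 0)
def pvPrefDiffs (level : List String) (j : Nat) : List Int :=
  ((pvPrefNums level j).zip (pvPrefNums level j).tail).map (fun p => p.2 - p.1)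
def pvMono (ds : List Int) : Bool :=
  ds.all (fun d => decide (1 ≤ d) && decide (d ≤ 3)) ||
  ds.all (fun d => decide (-3 ≤ d) && decide (d ≤ -1))

-- Pre_ excludes exactly the inputs on which A raises ValueError: a list of length ≥ 2 whose first
-- element rejected by int() is reached by the scan, i.e. every earlier element parses and the
-- earlier diffs form a safe monotone run; B raises ValueError on exactly the same inputs.
def Pre_checkIfSave (level : List String) : Prop :=
  ∀ j, (hj : j < level.length) → 2 ≤ level.length →
    (PySem.Int.ofStr? (level[j])).isSome = false →
    ((∃ m, ∃ hm : m < level.length, m < j ∧ (PySem.Int.ofStr? (level[m])).isSome = false) ∨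
     pvMono (pvPrefDiffs level j) = false)
instance (level : List String) : Decidable (Pre_checkIfSave level) := by unfold Pre_checkIfSave; infer_instance
def pvWitness_checkIfSave : List String := ["1", "3", "6"]

def Spec_checkIfSave (level : List String) (out : Bool) : Prop := out = checkIfSave_alt level
instance (level : List String) (out : Bool) : Decidable (Spec_checkIfSave level out) := by unfold Spec_checkIfSave; infer_instance

-- ===== CLAIM (what is proved, stated in full; the proofs are below) =====
def Claim_equal_checkIfSave : Prop := ∀ (level : List String), Dom_checkIfSave level → Pre_checkIfSave level → Spec_checkIfSave level (checkIfSave level)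

-- ===== LEMMAS AND PROOFS =====

-- the fully parsed values and their adjacent diffs (proof-side view shared by both ports)
def pvNumsB (level : List String) : List Int :=
  level.map (fun x => (PySem.Int.ofStr? x).getD 0)

def pvDiffsB (level : List String) : List Int :=
  ((pvNumsB level).zip (pvNumsB level).tail).map (fun p => p.2 - p.1)

-- A's loop body as a recursion over the list of remaining diffs
def pvGoI : Int → List Int → Bool
  | _, [] => true
  | dir, d :: ds =>
    if d.natAbs = 0 ∨ d.natAbs > 3 then false
    else if dir = 0 then pvGoI (if d > 0 then 1 else -1) ds
    else if dir * d < 0 then false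
    else pvGoI dir ds

lemma pvGoI_head_pos_false (d : Int) (h : ¬ (1 ≤ d ∧ d ≤ 3)) :
    (decide (1 ≤ d) && decide (d ≤ 3)) = false := by
  simp only [Bool.and_eq_false_iff, decide_eq_false_iff_not]
  omega

lemma pvGoI_head_neg_false (d : Int) (h : ¬ (-3 ≤ d ∧ d ≤ -1)) :
    (decide (-3 ≤ d) && decide (d ≤ -1)) = false := by
  simp only [Bool.and_eq_false_iff, decide_eq_false_iff_not]
  omega

lemma pvGoI_pos (ds : List Int) :
    pvGoI 1 ds = ds.all (fun d => decide (1 ≤ d) && decide (d ≤ 3)) := by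
  induction ds with
  | nil => rfl
  | cons d ds ih =>
    simp only [pvGoI, List.all_cons, ih]
    rw [if_neg (by decide : ¬((1:Int) = 0))]
    split_ifs with h1 h2
    · rw [pvGoI_head_pos_false d (by omega)]
      simp
    · rw [pvGoI_head_pos_false d (by omega)]
      simp
    · have hd1 : (1:Int) ≤ d := by omega
      have hd3 : d ≤ 3 := by omega
      simp [hd1, hd3]

lemma pvGoI_neg (ds : List Int) :
    pvGoI (-1) ds = ds.all (fun d => decide (-3 ≤ d) && decide (d ≤ -1)) := by
  induction ds with
  | nil => rfl
  | cons d ds ih =>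
    simp only [pvGoI, List.all_cons, ih]
    rw [if_neg (by decide : ¬((-1:Int) = 0))]
    split_ifs with h1 h2
    · rw [pvGoI_head_neg_false d (by omega)]
      simp
    · rw [pvGoI_head_neg_false d (by omega)]
      simp
    · have hd1 : (-3:Int) ≤ d := by omega
      have hd3 : d ≤ -1 := by omega
      simp [hd1, hd3]

lemma pvGoI_zero (ds : List Int) :
    pvGoI 0 ds = (ds.all (fun d => decide (1 ≤ d) && decide (d ≤ 3)) ||
                  ds.all (fun d => decide (-3 ≤ d) && decide (d ≤ -1))) := by
  cases ds with
  | nil => rfl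
  | cons d ds =>
    simp only [pvGoI, List.all_cons]
    simp only [if_true]
    split_ifs with h1 hpos
    · rw [pvGoI_head_pos_false d (by omega), pvGoI_head_neg_false d (by omega)]
      simp
    · rw [pvGoI_pos, pvGoI_head_neg_false d (by omega)]
      have hd1 : (1:Int) ≤ d := by omega
      have hd3 : d ≤ 3 := by omega
      simp [hd1, hd3]
    · rw [pvGoI_neg, pvGoI_head_pos_false d (by omega)]
      have hd1 : (-3:Int) ≤ d := by omega
      have hd3 : d ≤ -1 := by omega
      simp [hd1, hd3]

lemma pvDiffsB_length (level : List String) :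
    (pvDiffsB level).length = level.length - 1 := by
  simp [pvDiffsB, pvNumsB]

lemma pvIntAt_eq (level : List String) (j : Nat) (hj : j < level.length) :
    pvIntAt level (j : Int) = (pvNumsB level)[j]'(by simpa [pvNumsB] using hj) := by
  simp [pvIntAt, pvNumsB, hj]

lemma pvDiffsB_getElem (level : List String) (j : Nat) (hj : j < (pvDiffsB level).length) :
    (pvDiffsB level)[j] =
      (pvNumsB level)[j + 1]'(by simp [pvNumsB]; rw [pvDiffsB_length] at hj; omega) -
      (pvNumsB level)[j]'(by simp [pvNumsB]; rw [pvDiffsB_length] at hj; omega) := by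
  have hj' := hj
  rw [pvDiffsB_length] at hj'
  simp [pvDiffsB, List.getElem_zip, List.getElem_tail]

lemma checkIfSaveGo_eq (level : List String) (dir : Int) (i : Nat) (hi : 1 ≤ i) :
    checkIfSaveGo level dir i = pvGoI dir ((pvDiffsB level).drop (i - 1)) := by
  by_cases h : i < level.length
  · have hlt : i - 1 < (pvDiffsB level).length := by rw [pvDiffsB_length]; omega
    have h1 : i - 1 + 1 = i := by omega
    have h2 : i + 1 - 1 = i := by omega
    have hdrop : (pvDiffsB level).drop (i - 1) =
        (pvDiffsB level)[i - 1]'hlt :: (pvDiffsB level).drop (i - 1 + 1) :=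
      List.drop_eq_getElem_cons hlt
    have hcast : ((i : Int) - 1) = ((i - 1 : Nat) : Int) := by omega
    have hdiff : pvIntAt level (i : Int) - pvIntAt level ((i : Int) - 1) =
        (pvDiffsB level)[i - 1]'hlt := by
      rw [hcast, pvIntAt_eq level i h, pvIntAt_eq level (i - 1) (by omega),
          pvDiffsB_getElem level (i - 1) hlt]
      simp only [h1]
    rw [hdrop, checkIfSaveGo, dif_pos h]
    simp only [hdiff, pvGoI]
    split_ifs with hb hz hpos hneg
    · rfl
    · rw [checkIfSaveGo_eq level 1 (i + 1) (by omega), h2, h1]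
    · rw [checkIfSaveGo_eq level (-1) (i + 1) (by omega), h2, h1]
    · rfl
    · rw [checkIfSaveGo_eq level dir (i + 1) (by omega), h2, h1]
  · have hnil : (pvDiffsB level).drop (i - 1) = [] := by
      apply List.drop_eq_nil_of_le
      rw [pvDiffsB_length]; omega
    rw [checkIfSaveGo, dif_neg h, hnil]
    rfl
termination_by level.length - i
decreasing_by all_goals omega

-- B's branch structure collapsed to the || of the two full-list scans, rephrased over pvDiffsB
lemma alt_eq (level : List String) :
    checkIfSave_alt level =
      ((pvDiffsB level).all (fun d => decide (1 ≤ d) && decide (d ≤ 3)) ||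
       (pvDiffsB level).all (fun d => decide (-3 ≤ d) && decide (d ≤ -1))) := by
  have h1 : pvAllInc level = (pvDiffsB level).all (fun d => decide (1 ≤ d) && decide (d ≤ 3)) := by
    simp only [pvAllInc, pvDiffsB, pvNumsB, pvToInt, ← List.map_tail, List.zip_map,
      List.all_map, Function.comp_def, Prod.map_snd, Prod.map_fst]
    rfl
  have h2 : pvAllDec level = (pvDiffsB level).all (fun d => decide (-3 ≤ d) && decide (d ≤ -1)) := by
    simp only [pvAllDec, pvDiffsB, pvNumsB, pvToInt, ← List.map_tail, List.zip_map,
      List.all_map, Function.comp_def, Prod.map_snd, Prod.map_fst]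
    rfl
  unfold checkIfSave_alt
  rw [h1, h2]
  by_cases h : (pvDiffsB level).all (fun d => decide (1 ≤ d) && decide (d ≤ 3)) = true
  · simp [h]
  · simp [h]

-- ===== VERDICT (by name: the statement is the Claim_ definition above) =====
theorem checkIfSave_spec : Claim_equal_checkIfSave := by
  intro level _ _
  unfold Spec_checkIfSave checkIfSave
  rw [checkIfSaveGo_eq level 0 1 (by omega)]
  rw [alt_eq]
  simp [pvGoI_zero]
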